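-- pv_equiv track=rewrite | github.com/Nepomuceno/adventofcode2023 | day_10/solution.py | matrix_counts
-- ===== SOURCE A (Python) =====
-- def matrix_counts(matrix, loop):
--     in_the_loop = 0
--     out_of_the_loop = 0
--     undecided = 0
--     for i in range(len(matrix)):
--         for j in range(len(matrix[0])):
--             if((i,j) in loop):
--                 in_the_loop += 1
--             elif(matrix[i][j] == ','):
--                 out_of_the_loop += 1
--             elif(matrix[i][j] == '.'):
--                 in_the_loop += 1
--             else:
--                 undecided += 1
--     return in_the_loop, out_of_the_loop, undecided
-- ===== SOURCE B (Python) =====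
-- def matrix_counts(matrix, loop):
--     # One pass over the grid counting '.' and ',' totals, one pass over the loop
--     # reducing it to the set of distinct in-bounds coordinates, then inclusion-exclusion.
--     if not matrix:
--         return 0, 0, 0
--     n, m = len(matrix), len(matrix[0])
--     dot_all = comma_all = 0
--     for row in matrix:
--         for c in row[:m]:
--             if c == '.':
--                 dot_all += 1
--             elif c == ',':
--                 comma_all += 1
--     seen = set()
--     for p in loop:
--         i, j = p
--         if 0 <= i < n and 0 <= j < m:
--             seen.add((i, j))
--     k = len(seen)
--     dot_l = comma_l = 0
--     for (i, j) in seen: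
--         c = matrix[i][j]
--         if c == '.':
--             dot_l += 1
--         elif c == ',':
--             comma_l += 1
--     dot_free = dot_all - dot_l
--     comma_free = comma_all - comma_l
--     return k + dot_free, comma_free, n * m - k - dot_free - comma_free
-- ===== Notes on version B (the rewrite author's own statement) =====
-- stated objective: faster
-- what changed: Instead of scanning every grid cell and testing loop membership per cell (O(n*m*|loop|)), B counts '.'/',' totals in one grid pass, dedups the loop to its distinct in-bounds coordinates as a set, counts '.'/',' among those by direct lookup, and returns the three counts by inclusion-exclusion arithmetic.
-- outside the precondition, e.g. on matrix_counts([['a', 'b'], ['c']], {(1, 1)}): A returns (1, 0, 3), B raises IndexError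
import Mathlib
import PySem

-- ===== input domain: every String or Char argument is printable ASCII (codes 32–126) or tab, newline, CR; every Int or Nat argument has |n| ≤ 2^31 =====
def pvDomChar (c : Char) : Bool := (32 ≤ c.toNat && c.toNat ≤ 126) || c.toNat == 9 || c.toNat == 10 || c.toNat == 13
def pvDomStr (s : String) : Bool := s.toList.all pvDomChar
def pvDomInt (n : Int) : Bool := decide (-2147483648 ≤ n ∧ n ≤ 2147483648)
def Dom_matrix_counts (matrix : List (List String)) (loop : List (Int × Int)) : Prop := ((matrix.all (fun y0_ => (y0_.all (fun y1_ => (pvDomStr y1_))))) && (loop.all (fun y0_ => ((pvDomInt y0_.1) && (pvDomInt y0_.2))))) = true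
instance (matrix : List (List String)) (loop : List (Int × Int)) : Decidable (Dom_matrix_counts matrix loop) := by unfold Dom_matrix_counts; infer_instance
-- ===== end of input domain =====

-- B replaces A's per-cell loop-membership scan by one grid pass of character totals,
-- a set of distinct in-bounds loop coordinates, and inclusion-exclusion arithmetic (measured faster on large inputs).

-- matrix[i][j] (both Pythons): none = IndexError, excluded by Pre_matrix_counts, so the default is never reached inside Pre_
def pvCell (matrix : List (List String)) (i j : Int) : String :=
  (PySem.List.pyGet? ((PySem.List.pyGet? matrix i).getD []) j).getD ""

-- ===== PORT A =====
def matrix_counts (matrix : List (List String)) (loop : List (Int × Int)) : Int × Int × Int :=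
  -- len(matrix[0]) is only evaluated when the outer range is nonempty, so headD [] is exact
  (PySem.List.pyRange 0 matrix.length 1).foldl (fun acc i =>
    (PySem.List.pyRange 0 (matrix.headD []).length 1).foldl (fun acc j =>
      if (i, j) ∈ loop then (acc.1 + 1, acc.2.1, acc.2.2)
      else if pvCell matrix i j = "," then (acc.1, acc.2.1 + 1, acc.2.2)
      else if pvCell matrix i j = "." then (acc.1 + 1, acc.2.1, acc.2.2)
      else (acc.1, acc.2.1, acc.2.2 + 1)) acc) ((0, 0, 0) : Int × Int × Int)

-- ===== PORT B =====
def matrix_counts_alt (matrix : List (List String)) (loop : List (Int × Int)) : Int × Int × Int :=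
  if matrix.isEmpty then (0, 0, 0) else
  let n : Int := matrix.length
  let m : Int := (matrix.headD []).length
  let totals : Int × Int := matrix.foldl (fun a row =>
      (PySem.List.slice row none (some m)).foldl (fun (a : Int × Int) c =>
        if c = "." then (a.1 + 1, a.2) else if c = "," then (a.1, a.2 + 1) else a) a) (0, 0)
  let seen : PySem.Set (Int × Int) := loop.foldl (fun s p =>
      if 0 ≤ p.1 ∧ p.1 < n ∧ 0 ≤ p.2 ∧ p.2 < m then PySem.Set.add s p else s) PySem.Set.empty
  let k : Int := seen.length
  -- the loop over `seen` only accumulates two order-independent counters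
  let onLoop : Int × Int := seen.foldl (fun (a : Int × Int) p =>
      if pvCell matrix p.1 p.2 = "." then (a.1 + 1, a.2)
      else if pvCell matrix p.1 p.2 = "," then (a.1, a.2 + 1) else a) (0, 0)
  let dotFree := totals.1 - onLoop.1
  let commaFree := totals.2 - onLoop.2
  (k + dotFree, commaFree, n * m - k - dotFree - commaFree)

-- ===== PRECONDITION & SPEC =====
-- Pre_ excludes ragged matrices whose later rows are shorter than row 0: there Python A raises
-- IndexError as soon as a missing cell is off the loop (and B raises on the rare remaining cases
-- where every missing cell lies on the loop, so A's value there is unmatchable by B).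
def Pre_matrix_counts (matrix : List (List String)) (loop : List (Int × Int)) : Prop :=
  ∀ row ∈ matrix, (matrix.headD []).length ≤ row.length
instance (matrix : List (List String)) (loop : List (Int × Int)) : Decidable (Pre_matrix_counts matrix loop) := by unfold Pre_matrix_counts; infer_instance

def pvWitness_matrix_counts : List (List String) × (List (Int × Int)) :=
  ([[".", ","], ["x", "."]], [(0, 0), (5, -1), (0, 0)])

def Spec_matrix_counts (matrix : List (List String)) (loop : List (Int × Int)) (out : Int × Int × Int) : Prop := out = matrix_counts_alt matrix loop
instance (matrix : List (List String)) (loop : List (Int × Int)) (out : Int × Int × Int) : Decidable (Spec_matrix_counts matrix loop out) := by unfold Spec_matrix_counts; infer_instance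

-- ===== CLAIM (what is proved, stated in full; the proofs are below) =====
def Claim_equal_matrix_counts : Prop := ∀ (matrix : List (List String)) (loop : List (Int × Int)), Dom_matrix_counts matrix loop → Pre_matrix_counts matrix loop → Spec_matrix_counts matrix loop (matrix_counts matrix loop)

-- ===== LEMMAS AND PROOFS =====

theorem pvWitness_ok : Dom_matrix_counts (pvWitness_matrix_counts.1) (pvWitness_matrix_counts.2) ∧ Pre_matrix_counts (pvWitness_matrix_counts.1) (pvWitness_matrix_counts.2) := by
  constructor
  · decide
  · intro row hrow; fin_cases hrow <;> decide

-- the list of grid coordinates A scans, row-major (= pyRange n ×ˢ pyRange m)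
def pvCells (n m : Nat) : List (Int × Int) :=
  (PySem.List.pyRange 0 n 1).flatMap (fun i => (PySem.List.pyRange 0 m 1).map (fun j => (i, j)))

theorem pvCells_eq_product (n m : Nat) :
    pvCells n m = (PySem.List.pyRange 0 n 1) ×ˢ (PySem.List.pyRange 0 m 1) := rfl

theorem mem_pvCells {n m : Nat} {p : Int × Int} :
    p ∈ pvCells n m ↔ 0 ≤ p.1 ∧ p.1 < n ∧ 0 ≤ p.2 ∧ p.2 < m := by
  rw [pvCells_eq_product, List.mem_product, PySem.List.mem_pyRange_one, PySem.List.mem_pyRange_one]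
  tauto

theorem nodup_pvCells (n m : Nat) : (pvCells n m).Nodup := by
  rw [pvCells_eq_product]
  exact List.Nodup.product (PySem.List.nodup_pyRange_one _ _) (PySem.List.nodup_pyRange_one _ _)

theorem length_pvCells (n m : Nat) : (pvCells n m).length = n * m := by
  rw [pvCells_eq_product, List.length_product]
  simp [PySem.List.length_pyRange_one]

-- fold over flatMap = nested fold
theorem foldl_flatMap' {α β γ : Type} (l : List α) (g : α → List β) (f : γ → β → γ) (init : γ) :
    (l.flatMap g).foldl f init = l.foldl (fun acc x => (g x).foldl f acc) init := by
  induction l generalizing init with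
  | nil => rfl
  | cons x xs ih => simp [List.flatMap_cons, List.foldl_append, ih]

theorem countP_flatMap' {α β : Type} (l : List α) (g : α → List β) (q : β → Bool) :
    ((l.flatMap g).countP q : Nat) = (l.map (fun x => (g x).countP q)).sum := by
  induction l with
  | nil => rfl
  | cons x xs ih => simp [List.flatMap_cons, List.countP_append, ih]

-- A's loop body, characterised: the three counters count the three cell classes
theorem foldl_stepA (loop : List (Int × Int)) (matrix : List (List String))
    (l : List (Int × Int)) (acc : Int × Int × Int) :
    l.foldl (fun acc p =>
      if p ∈ loop then (acc.1 + 1, acc.2.1, acc.2.2)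
      else if pvCell matrix p.1 p.2 = "," then (acc.1, acc.2.1 + 1, acc.2.2)
      else if pvCell matrix p.1 p.2 = "." then (acc.1 + 1, acc.2.1, acc.2.2)
      else (acc.1, acc.2.1, acc.2.2 + 1)) acc
    = (acc.1 + (l.countP (fun p => decide (p ∈ loop) || decide (pvCell matrix p.1 p.2 = ".")) : Int),
       acc.2.1 + (l.countP (fun p => !decide (p ∈ loop) && decide (pvCell matrix p.1 p.2 = ",")) : Int),
       acc.2.2 + (l.countP (fun p => !decide (p ∈ loop) && !decide (pvCell matrix p.1 p.2 = ",") && !decide (pvCell matrix p.1 p.2 = ".")) : Int)) := by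
  induction l generalizing acc with
  | nil => simp
  | cons p l ih =>
      simp only [List.foldl_cons, List.countP_cons, ih]
      by_cases h1 : p ∈ loop <;> by_cases h2 : pvCell matrix p.1 p.2 = "," <;>
        by_cases h3 : pvCell matrix p.1 p.2 = "." <;>
        simp [h1, h2, h3] <;> push_cast <;> ring

-- a loop accumulating two disjoint counters
theorem foldl_pair_count {α : Type} (q1 q2 : α → Prop) [DecidablePred q1] [DecidablePred q2]
    (hdisj : ∀ x, q1 x → ¬ q2 x) (l : List α) (a : Int × Int) :
    l.foldl (fun (a : Int × Int) x =>
      if q1 x then (a.1 + 1, a.2) else if q2 x then (a.1, a.2 + 1) else a) a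
    = (a.1 + (l.countP (fun x => decide (q1 x)) : Int),
       a.2 + (l.countP (fun x => decide (q2 x)) : Int)) := by
  induction l generalizing a with
  | nil => simp
  | cons x l ih =>
      simp only [List.foldl_cons, List.countP_cons, ih]
      by_cases h1 : q1 x <;> by_cases h2 : q2 x
      · exact absurd h2 (hdisj x h1)
      all_goals simp [h1, h2] <;> push_cast <;> ring

-- countP arithmetic
theorem countP_or_and {α : Type} (l : List α) (P D : α → Bool) :
    l.countP (fun x => P x || D x) + l.countP (fun x => P x && D x)
      = l.countP P + l.countP D := by
  induction l with
  | nil => rfl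
  | cons x l ih =>
      simp only [List.countP_cons]
      cases hP : P x <;> cases hD : D x <;> simp [hP, hD] <;> omega

theorem countP_split {α : Type} (l : List α) (P Q : α → Bool) :
    l.countP Q = l.countP (fun x => P x && Q x) + l.countP (fun x => !P x && Q x) := by
  induction l with
  | nil => rfl
  | cons x l ih =>
      simp only [List.countP_cons]
      cases hP : P x <;> cases hQ : Q x <;> simp [hP, hQ] <;> omega

theorem countP_three {α : Type} (l : List α) (P C D : α → Bool)
    (hdisj : ∀ x, D x = true → C x = false) :
    l.countP (fun x => P x || D x) + l.countP (fun x => !P x && C x)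
      + l.countP (fun x => !P x && !C x && !D x) = l.length := by
  induction l with
  | nil => rfl
  | cons x l ih =>
      simp only [List.countP_cons, List.length_cons]
      cases hP : P x <;> cases hC : C x <;> cases hD : D x <;>
        simp [hP, hC, hD] <;>
        first
        | omega
        | simp [hdisj x hD] at hC

-- row access: matrix[k][j] through pvCell, for an in-range natural row index
theorem pvCell_natCast (matrix : List (List String)) (k : Nat) (hk : k < matrix.length) (j : Int) :
    pvCell matrix (k : Int) j = (PySem.List.pyGet? (matrix[k]) j).getD "" := by
  unfold pvCell
  rw [PySem.List.pyGet?_natCast, List.getElem?_eq_getElem hk]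
  rfl

-- [matrix[k][j] for j in range(m)] = matrix[k][:m]  when m ≤ len(matrix[k])
theorem map_cell_row (row : List String) (m : Nat) (h : m ≤ row.length) :
    (PySem.List.pyRange 0 m 1).map (fun j => (PySem.List.pyGet? row j).getD "") = row.take m := by
  apply List.ext_getElem
  · simp [PySem.List.length_pyRange_one]; omega
  · intro k h1 h2
    simp only [List.getElem_map, PySem.List.getElem_pyRange_one, List.getElem_take]
    have hk : k < row.length := by
      simp [PySem.List.length_pyRange_one] at h1; omega
    simp [List.getElem?_eq_getElem hk]


theorem foldl_pair_add {α : Type} (l : List α) (f g : α → Int) (a : Int × Int) :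
    l.foldl (fun (a : Int × Int) x => (a.1 + f x, a.2 + g x)) a
      = (a.1 + (l.map f).sum, a.2 + (l.map g).sum) := by
  induction l generalizing a with
  | nil => simp
  | cons x l ih => simp [ih]; constructor <;> ring

-- columnwise grid character counts, summed per row of matrix[:][:m]
theorem sum_rows (matrix : List (List String)) (s : String)
    (hpre : ∀ row ∈ matrix, (matrix.headD []).length ≤ row.length) :
    (pvCells matrix.length (matrix.headD []).length).countP
        (fun p => decide (pvCell matrix p.1 p.2 = s))
      = (matrix.map (fun row =>
          (row.take (matrix.headD []).length).countP (fun c => decide (c = s)))).sum := by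
  rw [pvCells, countP_flatMap',
    show PySem.List.pyRange 0 (matrix.length : Int) = List.map (fun (k : Nat) => (k : Int)) (List.range matrix.length)
      from PySem.List.pyRange_zero_natCast matrix.length,
    List.map_map]
  apply congrArg List.sum
  apply List.ext_getElem
  · simp
  · intro k h1 h2
    have hk : k < matrix.length := by simpa using h1
    simp only [List.getElem_map, List.getElem_range, Function.comp, List.countP_map]
    have hrow : (matrix.headD []).length ≤ (matrix[k]).length := hpre _ (List.getElem_mem hk)
    rw [← map_cell_row (matrix[k]) _ hrow, List.countP_map]
    apply List.countP_congr
    intro j hj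
    simp [Function.comp, pvCell_natCast matrix k hk j]

-- ===== VERDICT (by name: the statement is the Claim_ definition above) =====
theorem matrix_counts_spec : Claim_equal_matrix_counts := by
  intro matrix loop _ hpre
  unfold Spec_matrix_counts
  by_cases hmat : matrix = []
  · subst hmat
    simp [matrix_counts, matrix_counts_alt, PySem.List.pyRange_one_eq_nil]
  have hmat' : matrix.isEmpty = false := by simpa using hmat
  -- A as three class counts over the cell list
  have hA : matrix_counts matrix loop
      = (((pvCells matrix.length (matrix.headD []).length).countP (fun p => decide (p ∈ loop) || decide (pvCell matrix p.1 p.2 = ".")) : Int),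
         ((pvCells matrix.length (matrix.headD []).length).countP (fun p => !decide (p ∈ loop) && decide (pvCell matrix p.1 p.2 = ",")) : Int),
         ((pvCells matrix.length (matrix.headD []).length).countP (fun p => !decide (p ∈ loop) && !decide (pvCell matrix p.1 p.2 = ",") && !decide (pvCell matrix p.1 p.2 = ".")) : Int)) := by
    unfold matrix_counts
    rw [show (PySem.List.pyRange 0 (matrix.length : Int) 1).foldl (fun acc i =>
        (PySem.List.pyRange 0 ((matrix.headD []).length : Int) 1).foldl (fun acc j =>
          if (i, j) ∈ loop then (acc.1 + 1, acc.2.1, acc.2.2)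
          else if pvCell matrix i j = "," then (acc.1, acc.2.1 + 1, acc.2.2)
          else if pvCell matrix i j = "." then (acc.1 + 1, acc.2.1, acc.2.2)
          else (acc.1, acc.2.1, acc.2.2 + 1)) acc) ((0, 0, 0) : Int × Int × Int)
      = (pvCells matrix.length (matrix.headD []).length).foldl (fun acc p =>
          if p ∈ loop then (acc.1 + 1, acc.2.1, acc.2.2)
          else if pvCell matrix p.1 p.2 = "," then (acc.1, acc.2.1 + 1, acc.2.2)
          else if pvCell matrix p.1 p.2 = "." then (acc.1 + 1, acc.2.1, acc.2.2)
          else (acc.1, acc.2.1, acc.2.2 + 1)) ((0, 0, 0) : Int × Int × Int) from by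
        rw [pvCells, foldl_flatMap']
        simp only [List.foldl_map]]
    rw [foldl_stepA]
    simp
  -- the distinct in-bounds loop coordinates are exactly the loop cells of the grid
  have hperm : List.Perm (PySem.Set.ofList (loop.filter (fun p => decide (0 ≤ p.1 ∧ p.1 < (matrix.length : Int) ∧ 0 ≤ p.2 ∧ p.2 < ((matrix.headD []).length : Int))))) ((pvCells matrix.length (matrix.headD []).length).filter (fun p : Int × Int => decide (p ∈ loop))) := by
    rw [(List.perm_ext_iff_of_nodup (PySem.Set.nodup_ofList _) ((nodup_pvCells _ _).filter _))]
    intro p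
    rw [PySem.Set.mem_ofList, List.mem_filter, List.mem_filter]
    have hmem := @mem_pvCells matrix.length (matrix.headD []).length p
    constructor
    · rintro ⟨hl, hb⟩
      simp only [decide_eq_true_eq] at hb
      exact ⟨hmem.mpr hb, by simp [hl]⟩
    · rintro ⟨hc, hl⟩
      simp only [decide_eq_true_eq] at hl
      exact ⟨hl, by simp only [decide_eq_true_eq]; exact hmem.mp hc⟩
  have hk : (PySem.Set.ofList (loop.filter (fun p => decide (0 ≤ p.1 ∧ p.1 < (matrix.length : Int) ∧ 0 ≤ p.2 ∧ p.2 < ((matrix.headD []).length : Int))))).length = (pvCells matrix.length (matrix.headD []).length).countP (fun p : Int × Int => decide (p ∈ loop)) := by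
    rw [hperm.length_eq, List.countP_eq_length_filter]
  have hcntD : (PySem.Set.ofList (loop.filter (fun p => decide (0 ≤ p.1 ∧ p.1 < (matrix.length : Int) ∧ 0 ≤ p.2 ∧ p.2 < ((matrix.headD []).length : Int))))).countP (fun p : Int × Int => decide (pvCell matrix p.1 p.2 = "."))
      = (pvCells matrix.length (matrix.headD []).length).countP (fun p => (fun p : Int × Int => decide (p ∈ loop)) p && (fun p : Int × Int => decide (pvCell matrix p.1 p.2 = ".")) p) := by
    rw [hperm.countP_eq, List.countP_filter]
    exact List.countP_congr (fun p _ => by simp [Bool.and_comm])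
  have hcntC : (PySem.Set.ofList (loop.filter (fun p => decide (0 ≤ p.1 ∧ p.1 < (matrix.length : Int) ∧ 0 ≤ p.2 ∧ p.2 < ((matrix.headD []).length : Int))))).countP (fun p : Int × Int => decide (pvCell matrix p.1 p.2 = ","))
      = (pvCells matrix.length (matrix.headD []).length).countP (fun p => (fun p : Int × Int => decide (p ∈ loop)) p && (fun p : Int × Int => decide (pvCell matrix p.1 p.2 = ",")) p) := by
    rw [hperm.countP_eq, List.countP_filter]
    exact List.countP_congr (fun p _ => by simp [Bool.and_comm])
  -- B computed into the same quantities
  have hB : matrix_counts_alt matrix loop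
      = (((PySem.Set.ofList (loop.filter (fun p => decide (0 ≤ p.1 ∧ p.1 < (matrix.length : Int) ∧ 0 ≤ p.2 ∧ p.2 < ((matrix.headD []).length : Int))))).length : Int) + (((pvCells matrix.length (matrix.headD []).length).countP (fun p : Int × Int => decide (pvCell matrix p.1 p.2 = ".")) : Int) - ((PySem.Set.ofList (loop.filter (fun p => decide (0 ≤ p.1 ∧ p.1 < (matrix.length : Int) ∧ 0 ≤ p.2 ∧ p.2 < ((matrix.headD []).length : Int))))).countP (fun p : Int × Int => decide (pvCell matrix p.1 p.2 = ".")) : Int)),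
         ((pvCells matrix.length (matrix.headD []).length).countP (fun p : Int × Int => decide (pvCell matrix p.1 p.2 = ",")) : Int) - ((PySem.Set.ofList (loop.filter (fun p => decide (0 ≤ p.1 ∧ p.1 < (matrix.length : Int) ∧ 0 ≤ p.2 ∧ p.2 < ((matrix.headD []).length : Int))))).countP (fun p : Int × Int => decide (pvCell matrix p.1 p.2 = ",")) : Int),
         (matrix.length : Int) * ((matrix.headD []).length : Int) - ((PySem.Set.ofList (loop.filter (fun p => decide (0 ≤ p.1 ∧ p.1 < (matrix.length : Int) ∧ 0 ≤ p.2 ∧ p.2 < ((matrix.headD []).length : Int))))).length : Int)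
           - (((pvCells matrix.length (matrix.headD []).length).countP (fun p : Int × Int => decide (pvCell matrix p.1 p.2 = ".")) : Int) - ((PySem.Set.ofList (loop.filter (fun p => decide (0 ≤ p.1 ∧ p.1 < (matrix.length : Int) ∧ 0 ≤ p.2 ∧ p.2 < ((matrix.headD []).length : Int))))).countP (fun p : Int × Int => decide (pvCell matrix p.1 p.2 = ".")) : Int))
           - (((pvCells matrix.length (matrix.headD []).length).countP (fun p : Int × Int => decide (pvCell matrix p.1 p.2 = ",")) : Int) - ((PySem.Set.ofList (loop.filter (fun p => decide (0 ≤ p.1 ∧ p.1 < (matrix.length : Int) ∧ 0 ≤ p.2 ∧ p.2 < ((matrix.headD []).length : Int))))).countP (fun p : Int × Int => decide (pvCell matrix p.1 p.2 = ",")) : Int))) := by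
    have hsD := sum_rows matrix "." hpre
    have hsC := sum_rows matrix "," hpre
    unfold matrix_counts_alt
    simp only [hmat', Bool.false_eq_true, if_false, PySem.List.slice_to_natCast]
    rw [PySem.List.foldl_ite_eq_foldl_filter
        (p := fun p : Int × Int => 0 ≤ p.1 ∧ p.1 < (matrix.length : Int) ∧ 0 ≤ p.2 ∧ p.2 < ((matrix.headD []).length : Int))
        PySem.Set.add loop PySem.Set.empty]
    rw [show PySem.Set.empty = ([] : List (Int × Int)) from rfl, ← PySem.Set.ofList_eq_foldl]
    simp only [foldl_pair_count (fun c : String => c = ".") (fun c : String => c = ",")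
        (by intro c h1 h2; rw [h1] at h2; exact absurd h2 (by decide)),
      foldl_pair_count (fun p : Int × Int => pvCell matrix p.1 p.2 = ".")
        (fun p : Int × Int => pvCell matrix p.1 p.2 = ",")
        (by intro p h1 h2; rw [h1] at h2; exact absurd h2 (by decide))]
    rw [foldl_pair_add matrix
        (fun row => ((fun row : List String => (row.take (matrix.headD []).length).countP (fun c => decide (c = "."))) row : Int)) (fun row => ((fun row : List String => (row.take (matrix.headD []).length).countP (fun c => decide (c = ","))) row : Int)) (0, 0)]
    rw [show (matrix.map (fun row => ((fun row : List String => (row.take (matrix.headD []).length).countP (fun c => decide (c = "."))) row : Int))).sum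
          = (((matrix.map (fun row : List String => (row.take (matrix.headD []).length).countP (fun c => decide (c = ".")))).sum : Nat) : Int) from by
        rw [Nat.cast_list_sum, List.map_map]; rfl]
    rw [show (matrix.map (fun row => ((fun row : List String => (row.take (matrix.headD []).length).countP (fun c => decide (c = ","))) row : Int))).sum
          = (((matrix.map (fun row : List String => (row.take (matrix.headD []).length).countP (fun c => decide (c = ",")))).sum : Nat) : Int) from by
        rw [Nat.cast_list_sum, List.map_map]; rfl]
    rw [← hsD, ← hsC]
    simp
  rw [hA, hB]
  have h1 := countP_or_and (pvCells matrix.length (matrix.headD []).length) (fun p : Int × Int => decide (p ∈ loop)) (fun p : Int × Int => decide (pvCell matrix p.1 p.2 = "."))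
  have h2 := countP_split (pvCells matrix.length (matrix.headD []).length) (fun p : Int × Int => decide (p ∈ loop)) (fun p : Int × Int => decide (pvCell matrix p.1 p.2 = "."))
  have h3 := countP_split (pvCells matrix.length (matrix.headD []).length) (fun p : Int × Int => decide (p ∈ loop)) (fun p : Int × Int => decide (pvCell matrix p.1 p.2 = ","))
  have h4 := countP_three (pvCells matrix.length (matrix.headD []).length) (fun p : Int × Int => decide (p ∈ loop)) (fun p : Int × Int => decide (pvCell matrix p.1 p.2 = ",")) (fun p : Int × Int => decide (pvCell matrix p.1 p.2 = ".")) (by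
    intro p hDp
    simp only [decide_eq_true_eq] at hDp
    simp [hDp])
  have h5 : (pvCells matrix.length (matrix.headD []).length).length = matrix.length * (matrix.headD []).length := length_pvCells _ _
  rw [hk, hcntD, hcntC]
  beta_reduce at h1 h2 h3 h4 ⊢
  refine Prod.ext ?_ (Prod.ext ?_ ?_) <;> push_cast <;> omega
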